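-- pv_equiv track=rewrite | github.com/KotisKotlyandii/lessons1 | ege22/112.py | f
-- ===== SOURCE A (Python) =====
-- def f(x):
--     L,M = 0,0
--     while x > 0:
--         L += 1
--         if x % 8 != 0:
--             M += x % 8
--         x //= 8
--     return L,M
-- ===== SOURCE B (Python) =====
-- def f(x):
--     if x <= 0:
--         return (0, 0)
--     s = oct(x)[2:]
--     return (len(s), sum(int(d) for d in s if d != '0'))
-- ===== Notes on version B (the rewrite author's own statement) =====
-- stated objective: simpler
-- what changed: Replaces the fused division loop with accumulators by materializing the octal digit string via oct() and taking two separate reductions (length and sum of nonzero digits) over it.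
import Mathlib
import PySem

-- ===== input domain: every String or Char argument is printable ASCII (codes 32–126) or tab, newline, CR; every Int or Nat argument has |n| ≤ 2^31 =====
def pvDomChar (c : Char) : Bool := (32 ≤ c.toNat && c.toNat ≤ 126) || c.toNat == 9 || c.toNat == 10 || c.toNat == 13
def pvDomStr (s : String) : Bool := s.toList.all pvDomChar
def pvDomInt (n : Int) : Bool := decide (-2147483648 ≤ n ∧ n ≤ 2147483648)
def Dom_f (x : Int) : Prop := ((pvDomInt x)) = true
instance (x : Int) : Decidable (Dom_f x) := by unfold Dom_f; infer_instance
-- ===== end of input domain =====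

-- B replaces A's fused division loop by materializing the octal digit list and two separate reductions (length, sum of nonzero digits); return values only, no side effects.

-- ===== PORT A =====
-- A's while loop: state (x, L, M); one step per octal digit.
def fLoop (x L M : Int) : Int × Int :=
  if h : x > 0 then
    fLoop (PySem.Int.floordiv x 8) (L + 1)
      (if PySem.Int.mod x 8 ≠ 0 then M + PySem.Int.mod x 8 else M)
  else (L, M)
termination_by x.toNat
decreasing_by
  rw [PySem.Int.floordiv_eq_ediv_of_pos (by norm_num)]
  omega

def f (x : Int) : Int × Int := fLoop x 0 0

-- ===== PORT B =====
-- port of Python's oct(x)[2:] for x > 0: the octal digits, most significant first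
def octDigits (x : Int) : List Int :=
  if h : x > 0 then octDigits (PySem.Int.floordiv x 8) ++ [PySem.Int.mod x 8]
  else []
termination_by x.toNat
decreasing_by
  rw [PySem.Int.floordiv_eq_ediv_of_pos (by norm_num)]
  omega

def f_alt (x : Int) : Int × Int :=
  if x ≤ 0 then (0, 0)
  else
    let s := octDigits x
    ((s.length : Int), (s.filter (· != 0)).sum)

-- ===== PRECONDITION & SPEC =====
def Spec_f (x : Int) (out : Int × Int) : Prop := out = f_alt x
instance (x : Int) (out : Int × Int) : Decidable (Spec_f x out) := by unfold Spec_f; infer_instance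

-- ===== CLAIM (what is proved, stated in full; the proofs are below) =====
def Claim_equal_f : Prop := ∀ (x : Int), Dom_f x → Spec_f x (f x)

-- ===== LEMMAS AND PROOFS =====
theorem fLoop_eq (x L M : Int) :
    fLoop x L M = (L + ((octDigits x).length : Int), M + ((octDigits x).filter (· != 0)).sum) := by
  induction x, L, M using fLoop.induct with
  | case1 x L M h ih =>
    rw [fLoop]
    simp only [dif_pos h]
    simp only [dite_eq_ite] at ih
    have hod : octDigits x = octDigits (PySem.Int.floordiv x 8) ++ [PySem.Int.mod x 8] := by
      rw [octDigits]; simp [h]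
    have hm8 : PySem.Int.mod x 8 = x % 8 := PySem.Int.mod_eq_emod_of_pos (by norm_num)
    rw [hm8] at ih hod ⊢
    rw [ih, hod]
    simp only [List.filter_append, List.length_append, List.sum_append, Prod.mk.injEq]
    by_cases hm : x % 8 = 0
    · simp [hm]; push_cast; omega
    · have hb : (x % 8 != 0) = true := by simpa using hm
      simp [hm, hb, List.filter]; push_cast; omega
  | case2 x L M h =>
    rw [fLoop, octDigits]
    simp [h]

-- ===== VERDICT (by name: the statement is the Claim_ definition above) =====
theorem f_spec : Claim_equal_f := by
  intro x _
  unfold Spec_f f f_alt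
  by_cases h : x ≤ 0
  · rw [fLoop, octDigits]
    simp [h, not_lt.mpr h]
  · simp only [h, if_false]
    rw [fLoop_eq]
    simp
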